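-- pv_equiv track=rewrite | github.com/bren-io/vibe_check | gpt_helper/reddit_gpt.py | format_gpt_request
-- ===== SOURCE A (Python) =====
-- delimiter = ' %% '
--
-- MAX_CHAR_BYTES = 6144 # Token max for request
--
-- def format_gpt_request(url_comments):
--      comments_str = delimiter.join(url_comments)
--      curr_diff = 0
--      min_diff = float('inf')
--      trim_pos = 0
--
--      for i in range(len(comments_str)):
--          if comments_str[i:i + len(delimiter)] == delimiter:
--              curr_diff = abs(len(comments_str[:i + len(delimiter)].encode()) - MAX_CHAR_BYTES)
--
--              if curr_diff < min_diff:
--                  trim_pos = i + len(delimiter)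
--                  min_diff = curr_diff
--
--      comments_str = comments_str[:trim_pos]
--      return comments_str
-- ===== SOURCE B (Python) =====
-- delimiter = ' %% '
--
-- MAX_CHAR_BYTES = 6144  # Token max for request
--
-- def format_gpt_request(url_comments):
--     # No scan at all: the candidate cut points bracket the byte budget, so two
--     # library searches suffice — the last delimiter ending strictly below the
--     # budget (rfind bounded to the budget) and the first delimiter ending at or
--     # above it (find from budget - len(delimiter)) — then pick the closer end,
--     # preferring the earlier one on a tie (positions = byte counts on ASCII text).
--     s = delimiter.join(url_comments)
--     lo = s.rfind(delimiter, 0, MAX_CHAR_BYTES - 1)          # last occurrence with end < budget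
--     hi = s.find(delimiter, MAX_CHAR_BYTES - len(delimiter)) # first occurrence with end >= budget
--     if lo == -1:
--         trim = 0 if hi == -1 else hi + len(delimiter)
--     elif hi == -1:
--         trim = lo + len(delimiter)
--     else:
--         a, b = lo + len(delimiter), hi + len(delimiter)
--         trim = a if MAX_CHAR_BYTES - a <= b - MAX_CHAR_BYTES else b
--     return s[:trim]
-- ===== Notes on version B (the rewrite author's own statement) =====
-- stated objective: faster
-- what changed: Instead of scanning every index of the joined string and re-encoding the whole prefix at each delimiter hit, B does no scan of its own: one bounded rfind gives the last delimiter ending below the byte budget, one find gives the first ending at or above it, and a single comparison picks the closer cut (positions = byte counts on the ASCII domain).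
import Mathlib
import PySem

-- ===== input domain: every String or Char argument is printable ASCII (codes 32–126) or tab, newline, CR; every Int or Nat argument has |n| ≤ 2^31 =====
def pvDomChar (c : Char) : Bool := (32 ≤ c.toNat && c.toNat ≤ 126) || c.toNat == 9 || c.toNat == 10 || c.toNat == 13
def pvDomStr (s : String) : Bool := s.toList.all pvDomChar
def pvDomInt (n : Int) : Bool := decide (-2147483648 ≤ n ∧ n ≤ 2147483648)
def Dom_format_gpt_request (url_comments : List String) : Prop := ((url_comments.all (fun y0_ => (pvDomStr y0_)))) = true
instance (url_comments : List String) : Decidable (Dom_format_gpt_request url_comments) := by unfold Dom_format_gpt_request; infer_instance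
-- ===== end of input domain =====

-- B replaces A's scan of every index of the joined string by two bounded library
-- searches (rfind below the byte budget, find from it) that bracket the budget,
-- then one comparison picks the cut; faster in a timing run.

-- ===== PORT A =====
def pvDelim : List Char := [' ', '%', '%', ' ']

-- hand port of len(str.encode()): UTF-8 byte count, exact (sum of per-code-point UTF-8 sizes)
def pvBytes (cs : List Char) : Int := cs.foldl (fun a c => a + (c.utf8Size : Int)) 0

def pvStepA (cs : List Char) (st : Int × Option Int × Nat) (i : Nat) : Int × Option Int × Nat :=
  if PySem.List.slice cs (some (i : Int)) (some ((i : Int) + 4)) = pvDelim then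
    let cd : Int := |pvBytes (PySem.List.slice cs none (some ((i : Int) + 4))) - 6144|
    if (match st.2.1 with | none => true | some m => decide (cd < m)) then (cd, some cd, i + 4)
    else (cd, st.2.1, st.2.2)
  else st

def format_gpt_request (url_comments : List String) : String :=
  let cs := (PySem.Str.join " %% " url_comments).toList
  let st := (List.range cs.length).foldl (pvStepA cs) (0, none, 0)
  String.ofList (PySem.List.slice cs none (some (st.2.2 : Int)))

-- ===== PORT B =====
-- Source B: lo = s.rfind(delimiter, 0, MAX_CHAR_BYTES - 1); hi = s.find(delimiter, MAX_CHAR_BYTES - len(delimiter))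
def format_gpt_request_alt (url_comments : List String) : String :=
  let cs := (PySem.Str.join " %% " url_comments).toList
  let lo := PySem.Chars.rfindFrom cs pvDelim 0 (some 6143)
  let hi := PySem.Chars.findFrom cs pvDelim 6140 none
  let trim : Int :=
    if lo = -1 then (if hi = -1 then 0 else hi + 4)
    else if hi = -1 then lo + 4
    else
      let a := lo + 4
      let b := hi + 4
      if 6144 - a ≤ b - 6144 then a else b
  String.ofList (PySem.List.slice cs none (some trim))

-- ===== PRECONDITION & SPEC =====
def Spec_format_gpt_request (url_comments : List String) (out : String) : Prop := out = format_gpt_request_alt url_comments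
instance (url_comments : List String) (out : String) : Decidable (Spec_format_gpt_request url_comments out) := by unfold Spec_format_gpt_request; infer_instance

-- ===== CLAIM (what is proved, stated in full; the proofs are below) =====
def Claim_equal_format_gpt_request : Prop := ∀ (url_comments : List String), Dom_format_gpt_request url_comments → Spec_format_gpt_request url_comments (format_gpt_request url_comments)

-- ===== LEMMAS AND PROOFS =====

-- occurrence positions of the delimiter in cs, in increasing order (proof-only)
def pvOccs (cs : List Char) : List Nat :=
  (List.range cs.length).filter (fun i => decide (pvDelim <+: cs.drop i))

-- A's then-branch (the body run at a delimiter hit), named for the filter/congr rewriting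
def pvGA (cs : List Char) (st : Int × Option Int × Nat) (i : Nat) : Int × Option Int × Nat :=
  let cd : Int := |pvBytes (PySem.List.slice cs none (some ((i : Int) + 4))) - 6144|
  if (match st.2.1 with | none => true | some m => decide (cd < m)) then (cd, some cd, i + 4)
  else (cd, st.2.1, st.2.2)

-- the same step expressed on the end position e = i + 4 with byte count = position
def pvStepK (st : Int × Option Int × Nat) (e : Nat) : Int × Option Int × Nat :=
  let cd : Int := |(e : Int) - 6144|
  if (match st.2.1 with | none => true | some m => decide (cd < m)) then (cd, some cd, e)
  else (cd, st.2.1, st.2.2)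

-- the running arg-min of |e - 6144| alone
def pvMinStep (acc : Option Nat) (e : Nat) : Option Nat :=
  match acc with
  | none => some e
  | some m => if |(e : Int) - 6144| < |(m : Int) - 6144| then some e else some m

-- B's choice written on the list of end positions: last end below the budget vs first end at/above it
def pvBracket (E : List Nat) : Option Nat :=
  match (E.filter (fun e => decide (e < 6144))).getLast?, (E.filter (fun e => decide (6144 ≤ e))).head? with
  | none, none => none
  | some a, none => some a
  | none, some b => some b
  | some a, some b => if (6144 : Int) - a ≤ (b : Int) - 6144 then some a else some b

lemma pv_ascii_utf8 (c : Char) (h : pvDomChar c = true) : c.utf8Size = 1 := by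
  have h1 : c.toNat ≤ 126 := by
    simp only [pvDomChar, Bool.or_eq_true, Bool.and_eq_true, decide_eq_true_eq, beq_iff_eq] at h
    omega
  have h2 : c.val ≤ UInt32.ofNatLT 127 Char.utf8Size._proof_1 := by
    rw [UInt32.le_iff_toNat_le, UInt32.toNat_ofNatLT]
    exact Nat.le_trans h1 (by omega)
  simp only [Char.utf8Size]
  rw [if_pos h2]

lemma pv_bytes_aux (l : List Char) (h : ∀ c ∈ l, pvDomChar c = true) :
    ∀ a : Int, l.foldl (fun a c => a + (c.utf8Size : Int)) a = a + (l.length : Int) := by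
  induction l with
  | nil => simp
  | cons x t ih =>
      intro a
      have hx := pv_ascii_utf8 x (h x (by simp))
      rw [List.foldl_cons, ih (fun c hc => h c (by simp [hc]))]
      simp [hx]
      ring

lemma pv_bytes_len (l : List Char) (h : ∀ c ∈ l, pvDomChar c = true) : pvBytes l = (l.length : Int) := by
  simpa using pv_bytes_aux l h 0

lemma pv_join_chars (sep : List Char) (parts : List (List Char))
    (hs : ∀ c ∈ sep, pvDomChar c = true) (hp : ∀ p ∈ parts, ∀ c ∈ p, pvDomChar c = true) :
    ∀ c ∈ PySem.Chars.join sep parts, pvDomChar c = true := by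
  induction parts with
  | nil => simp [PySem.Chars.join_nil]
  | cons p rest ih =>
      cases rest with
      | nil =>
          rw [PySem.Chars.join_singleton]
          exact hp p (by simp)
      | cons q rest' =>
          rw [PySem.Chars.join_cons_cons]
          intro c hc
          rcases List.mem_append.mp hc with hc' | hc'
          · rcases List.mem_append.mp hc' with hc'' | hc''
            · exact hp p (by simp) c hc''
            · exact hs c hc''
          · exact ih (fun r hr => hp r (by simp [hr])) c hc'

lemma pv_slice_eq_iff (cs : List Char) (i : Nat) :
    (PySem.List.slice cs (some (i : Int)) (some ((i : Int) + 4)) = pvDelim) ↔ pvDelim <+: cs.drop i := by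
  have hc : ((i : Int) + 4) = ((i + 4 : Nat) : Int) := by push_cast; ring
  rw [hc, PySem.List.slice_natCast]
  have h4 : i + 4 - i = 4 := by omega
  rw [h4]
  constructor
  · intro h; rw [← h]; exact List.take_prefix _ _
  · intro h
    have h5 : pvDelim = List.take pvDelim.length (List.drop i cs) := List.prefix_iff_eq_take.mp h
    have h6 : pvDelim.length = 4 := rfl
    rw [h6] at h5
    exact h5.symm

lemma pv_match_le (cs : List Char) (i : Nat) (h : pvDelim <+: cs.drop i) : i + 4 ≤ cs.length := by
  have h1 := h.length_le
  have h2 : pvDelim.length = 4 := rfl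
  rw [h2, List.length_drop] at h1
  omega

lemma pv_prefix_drop_infix (cs : List Char) (s i : Nat) (hsi : s ≤ i) (h : pvDelim <+: cs.drop i) :
    pvDelim <:+: cs.drop s := by
  have hdd : cs.drop i = (cs.drop s).drop (i - s) := by
    rw [List.drop_drop]; congr 1; omega
  rw [hdd] at h
  exact h.isInfix.trans (List.drop_suffix _ _).isInfix

lemma pv_filter_nil (p : Nat → Bool) (n s : Nat) (h : ∀ i, s ≤ i → i < n → p i = false) :
    (List.range n).filter (fun i => decide (s ≤ i) && p i) = [] := by
  rw [List.filter_eq_nil_iff]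
  intro i hi
  rw [List.mem_range] at hi
  by_cases hsi : s ≤ i
  · simp [hsi, h i hsi hi]
  · simp [hsi]

lemma pv_filter_cons (p : Nat → Bool) (n s j : Nat) (hsj : s ≤ j) (hjn : j < n) (hpj : p j = true)
    (hmin : ∀ i, s ≤ i → i < j → p i = false) :
    (List.range n).filter (fun i => decide (s ≤ i) && p i)
      = j :: (List.range n).filter (fun i => decide (j + 1 ≤ i) && p i) := by
  have hsplit : List.range n = List.range' 0 j ++ (j :: List.range' (j + 1) (n - j - 1)) := by
    rw [List.range_eq_range']
    have h1 : (j :: List.range' (j + 1) (n - j - 1)) = List.range' j (n - j) := by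
      have h2 : n - j = (n - j - 1) + 1 := by omega
      rw [h2, List.range'_succ]
      norm_num
    rw [h1]
    have h3 := @List.range'_append 0 j (n - j) 1
    simp only [Nat.one_mul, Nat.zero_add] at h3
    rw [h3]
    congr 1
    omega
  rw [hsplit]
  rw [List.filter_append, List.filter_append]
  have hfirst : ∀ q : Nat → Bool, (∀ i ∈ List.range' 0 j, q i = false) → (List.range' 0 j).filter q = [] := by
    intro q hq; rw [List.filter_eq_nil_iff]; intro i hi; simp [hq i hi]
  rw [hfirst _ (fun i hi => by
    rw [List.mem_range'_1] at hi
    by_cases hsi : s ≤ i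
    · simp [hsi, hmin i hsi (by omega)]
    · simp [hsi])]
  rw [hfirst _ (fun i hi => by
    rw [List.mem_range'_1] at hi
    simp [show ¬ (j + 1 ≤ i) by omega])]
  simp only [List.nil_append, List.filter_cons]
  rw [show (decide (s ≤ j) && p j) = true by simp [hsj, hpj]]
  rw [show (decide (j + 1 ≤ j) && p j) = false by simp]
  simp only [if_true, Bool.false_eq_true, if_false]
  congr 1
  apply List.filter_congr
  intro i hi
  rw [List.mem_range'_1] at hi
  simp [show s ≤ i by omega, show j + 1 ≤ i by omega]

lemma pv_foldl_filter {α β : Type} (c : β → Prop) [DecidablePred c] (g : α → β → α) (l : List β) (a : α) :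
    l.foldl (fun st x => if c x then g st x else st) a = (l.filter (fun x => decide (c x))).foldl g a := by
  induction l generalizing a with
  | nil => rfl
  | cons x t ih =>
      by_cases hx : c x <;> simp [hx, ih]

lemma pv_argmin_aux (es : List Nat) : ∀ (c : Int) (b : Nat),
    (es.foldl pvStepK (c, some (|(b : Int) - 6144|), b)).2.2
      = ((es.foldl pvMinStep (some b)).getD 0) := by
  induction es with
  | nil => intro c b; rfl
  | cons e t ih =>
      intro c b
      rw [List.foldl_cons, List.foldl_cons]
      by_cases hlt : |(e : Int) - 6144| < |(b : Int) - 6144|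
      · rw [show pvStepK (c, some (|(b : Int) - 6144|), b) e
              = (|(e : Int) - 6144|, some (|(e : Int) - 6144|), e) by
            simp [pvStepK, hlt]]
        rw [show pvMinStep (some b) e = some e by simp [pvMinStep, hlt]]
        exact ih _ e
      · rw [show pvStepK (c, some (|(b : Int) - 6144|), b) e
              = (|(e : Int) - 6144|, some (|(b : Int) - 6144|), b) by
            simp [pvStepK, hlt]]
        rw [show pvMinStep (some b) e = some b by simp [pvMinStep, hlt]]
        exact ih _ b

lemma pv_argmin (es : List Nat) (c : Int) :
    (es.foldl pvStepK (c, none, 0)).2.2 = (es.foldl pvMinStep none).getD 0 := by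
  cases es with
  | nil => rfl
  | cons e t =>
      rw [List.foldl_cons, List.foldl_cons]
      rw [show pvStepK (c, none, 0) e = (|(e : Int) - 6144|, some (|(e : Int) - 6144|), e) by
        simp [pvStepK]]
      rw [show pvMinStep none e = some e from rfl]
      exact pv_argmin_aux t _ e

lemma pv_abs_lt (e : Nat) (h : e < 6144) : |(e : Int) - 6144| = 6144 - (e : Int) := by
  rw [abs_of_neg (by omega : (e : Int) - 6144 < 0)]; ring

lemma pv_abs_ge (e : Nat) (h : 6144 ≤ e) : |(e : Int) - 6144| = (e : Int) - 6144 := by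
  rw [abs_of_nonneg (by omega : (0 : Int) ≤ (e : Int) - 6144)]

-- the running arg-min over a strictly increasing list of ends is B's bracket choice
lemma pv_bracket_spec (E : List Nat) (h : E.Pairwise (· < ·)) :
    E.foldl pvMinStep none = pvBracket E := by
  induction E using List.reverseRecOn with
  | nil => rfl
  | append_singleton E x ih =>
      have hE : E.Pairwise (· < ·) := (List.pairwise_append.mp h).1
      have hlt : ∀ e ∈ E, e < x := fun e he =>
        (List.pairwise_append.mp h).2.2 e he x (by simp)
      rw [List.foldl_append, List.foldl_cons, List.foldl_nil, ih hE]
      unfold pvBracket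
      rw [List.filter_append, List.filter_append]
      by_cases hx : x < 6144
      · -- every element is < 6144; the ≥-filter stays empty and x becomes the new last
        have hge : E.filter (fun e => decide (6144 ≤ e)) = [] := by
          rw [List.filter_eq_nil_iff]; intro e he
          have := hlt e he; simp; omega
        have hge' : [x].filter (fun e => decide (6144 ≤ e)) = [] := by
          simp; omega
        have hlt' : [x].filter (fun e => decide (e < 6144)) = [x] := by simp [hx]
        rw [hge, hge', hlt', List.getLast?_append]
        simp only [List.append_nil, List.getLast?_singleton, Option.some_or]
        rcases hl : (E.filter (fun e => decide (e < 6144))).getLast? with _ | a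
        · simp [hge, hl, pvMinStep]
        · have ha : a ∈ E := (List.mem_filter.mp (List.mem_of_mem_getLast? hl)).1
          have hax : a < x := hlt a ha
          simp only [hge, hl, pvMinStep, List.head?_nil]
          rw [pv_abs_lt x hx, pv_abs_lt a (by omega)]
          rw [if_pos (by omega : (6144 : Int) - x < 6144 - a)]
      · -- x ≥ 6144: the <-filter is unchanged, x lands at the back of the ≥-filter
        push_neg at hx
        have hlt' : [x].filter (fun e => decide (e < 6144)) = [] := by simp; omega
        have hge' : [x].filter (fun e => decide (6144 ≤ e)) = [x] := by simp [hx]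
        rw [hlt', hge', List.append_nil, List.head?_append]
        rcases hb : (E.filter (fun e => decide (6144 ≤ e))).head? with _ | b
        · -- no earlier end ≥ 6144: x is the first one
          simp only [Option.none_or, List.head?_singleton]
          rcases hl : (E.filter (fun e => decide (e < 6144))).getLast? with _ | a
          · simp [hb, hl, pvMinStep]
          · have ha' := List.mem_filter.mp (List.mem_of_mem_getLast? hl)
            have ha6 : a < 6144 := by have := ha'.2; simp at this; omega
            simp only [hb, hl, pvMinStep, List.head?_nil]
            rw [pv_abs_lt a ha6, pv_abs_ge x hx]
            by_cases hc : (6144 : Int) - a ≤ (x : Int) - 6144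
            · rw [if_neg (by omega), if_pos hc]
            · rw [if_pos (by omega), if_neg hc]
        · -- an earlier end ≥ 6144 exists: the bracket is unchanged and beats x
          have hb' := List.mem_filter.mp (List.mem_of_mem_head? hb)
          have hb6 : 6144 ≤ b := by have := hb'.2; simp at this; omega
          have hbx : b < x := hlt b hb'.1
          simp only [Option.some_or]
          rcases hl : (E.filter (fun e => decide (e < 6144))).getLast? with _ | a
          · simp only [hb, hl, pvMinStep]
            rw [pv_abs_ge b hb6, pv_abs_ge x hx]
            rw [if_neg (by omega : ¬ (x : Int) - 6144 < (b : Int) - 6144)]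
          · have ha' := List.mem_filter.mp (List.mem_of_mem_getLast? hl)
            have ha6 : a < 6144 := by have := ha'.2; simp at this; omega
            simp only [hb, hl, pvMinStep]
            rw [pv_abs_ge x hx]
            split_ifs with hc
            · show (if (x : Int) - 6144 < |(a : Int) - 6144| then some x else some a) = some a
              rw [pv_abs_lt a ha6, if_neg (by omega : ¬ (x : Int) - 6144 < 6144 - (a : Int))]
            · show (if (x : Int) - 6144 < |(b : Int) - 6144| then some x else some b) = some b
              rw [pv_abs_ge b hb6, if_neg (by omega : ¬ (x : Int) - 6144 < (b : Int) - 6144)]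

-- rfind.go searches backwards: its result is the last matching position ≤ k
lemma pv_go_spec (s sub : List Char) (k : Nat) :
    PySem.Chars.rfind.go s sub k =
      match ((List.range (k + 1)).filter (fun i => decide (sub <+: s.drop i))).getLast? with
      | none => -1
      | some a => (a : Int) := by
  induction k with
  | zero =>
      show (if sub.isPrefixOf s then (0 : Int) else -1) = _
      rw [show List.range 1 = [0] from rfl]
      by_cases hp : sub <+: s
      · rw [if_pos (List.isPrefixOf_iff_prefix.mpr (by simpa using hp))]
        simp [hp]
      · rw [if_neg (by rw [List.isPrefixOf_iff_prefix]; simpa using hp)]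
        simp [hp]
  | succ k ih =>
      show (if sub.isPrefixOf (s.drop (k + 1)) then ((k : Int) + 1) else PySem.Chars.rfind.go s sub k) = _
      rw [List.range_succ, List.filter_append]
      by_cases hp : sub <+: s.drop (k + 1)
      · rw [if_pos (List.isPrefixOf_iff_prefix.mpr hp)]
        rw [show List.filter (fun i => decide (sub <+: s.drop i)) [k + 1] = [k + 1] by simp [hp]]
        rw [List.getLast?_append]
        simp
      · rw [if_neg (by rw [List.isPrefixOf_iff_prefix]; exact hp)]
        rw [show List.filter (fun i => decide (sub <+: s.drop i)) [k + 1] = [] by simp [hp]]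
        rw [List.append_nil, ih]

lemma pv_prefix_take (cs : List Char) (i m : Nat) :
    pvDelim <+: (cs.take m).drop i ↔ pvDelim <+: cs.drop i ∧ i + 4 ≤ m := by
  rw [List.drop_take, List.prefix_take_iff, show pvDelim.length = 4 from rfl]
  constructor <;> rintro ⟨h1, h2⟩ <;> exact ⟨h1, by omega⟩

lemma pv_filter_range_congr (c : Nat → Bool) (n₁ n₂ : Nat) (h : ∀ i, c i = true → i < n₁ ∧ i < n₂) :
    (List.range n₁).filter c = (List.range n₂).filter c := by
  suffices H : ∀ a b : Nat, a ≤ b → (∀ i, c i = true → i < a) →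
      (List.range a).filter c = (List.range b).filter c by
    rcases le_total n₁ n₂ with hle | hle
    · exact H n₁ n₂ hle (fun i hi => (h i hi).1)
    · exact (H n₂ n₁ hle (fun i hi => (h i hi).2)).symm
  intro a b hab hc
  have hsplit : List.range b = List.range a ++ List.range' a (b - a) := by
    rw [List.range_eq_range', List.range_eq_range']
    have h3 := @List.range'_append 0 a (b - a) 1
    simp only [Nat.one_mul, Nat.zero_add] at h3
    rw [h3]
    congr 1
    omega
  have hnil : (List.range' a (b - a)).filter c = [] := by
    rw [List.filter_eq_nil_iff]
    intro i hi
    rw [List.mem_range'_1] at hi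
    by_contra hci
    exact absurd (hc i hci) (by omega)
  rw [hsplit, List.filter_append, hnil, List.append_nil]

-- s.rfind(delimiter, 0, 6143) is the last delimiter position whose end stays ≤ 6143
lemma pv_lo_spec (cs : List Char) :
    PySem.Chars.rfindFrom cs pvDelim 0 (some 6143) =
      match ((pvOccs cs).filter (fun i => decide (i + 4 ≤ 6143))).getLast? with
      | none => -1
      | some a => (a : Int) := by
  have hmain : ∀ m : Nat, m ≤ cs.length → m ≤ 6143 → (∀ i, pvDelim <+: cs.drop i → i + 4 ≤ 6143 → i + 4 ≤ m) →
      PySem.Chars.rfind (cs.take m) pvDelim =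
        match ((pvOccs cs).filter (fun i => decide (i + 4 ≤ 6143))).getLast? with
        | none => -1
        | some a => (a : Int) := by
    intro m hmn hm43 hup
    have hlen : (cs.take m).length = m := by
      rw [List.length_take]
      omega
    show PySem.Chars.rfind.go (cs.take m) pvDelim (cs.take m).length = _
    rw [hlen, pv_go_spec]
    have hc1 : (List.range (m + 1)).filter (fun i => decide (pvDelim <+: (cs.take m).drop i))
        = (List.range (m + 1)).filter (fun i => decide (pvDelim <+: cs.drop i) && decide (i + 4 ≤ 6143)) := by
      apply List.filter_congr
      intro i _
      by_cases hP : pvDelim <+: cs.drop i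
      · by_cases h43 : i + 4 ≤ 6143
        · simp [pv_prefix_take, hP, h43, hup i hP h43]
        · have : ¬ (i + 4 ≤ m) := by omega
          simp [pv_prefix_take, hP, h43, this]
      · simp [pv_prefix_take, hP]
    have hc2 : (List.range (m + 1)).filter (fun i => decide (pvDelim <+: cs.drop i) && decide (i + 4 ≤ 6143))
        = (List.range cs.length).filter (fun i => decide (pvDelim <+: cs.drop i) && decide (i + 4 ≤ 6143)) := by
      apply pv_filter_range_congr
      intro i hi
      rw [Bool.and_eq_true, decide_eq_true_eq, decide_eq_true_eq] at hi
      have := pv_match_le cs i hi.1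
      have := hup i hi.1 hi.2
      omega
    have hc3 : (pvOccs cs).filter (fun i => decide (i + 4 ≤ 6143))
        = (List.range cs.length).filter (fun i => decide (pvDelim <+: cs.drop i) && decide (i + 4 ≤ 6143)) := by
      rw [pvOccs, List.filter_filter]
      apply List.filter_congr
      intro i _
      rw [Bool.and_comm]
    rw [hc1, hc2, ← hc3]
  have hres : ∀ m : Nat, m ≤ cs.length → m ≤ 6143 → (∀ i, pvDelim <+: cs.drop i → i + 4 ≤ 6143 → i + 4 ≤ m) →
      (if PySem.Chars.rfind (cs.take m) pvDelim = -1 then (-1 : Int)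
       else 0 + PySem.Chars.rfind (cs.take m) pvDelim) =
        match ((pvOccs cs).filter (fun i => decide (i + 4 ≤ 6143))).getLast? with
        | none => -1
        | some a => (a : Int) := by
    intro m h1 h2 h3
    rw [hmain m h1 h2 h3]
    rcases ((pvOccs cs).filter (fun i => decide (i + 4 ≤ 6143))).getLast? with _ | a
    · simp
    · rw [if_neg (by omega : ¬ ((a : Nat) : Int) = -1)]
      omega
  simp only [PySem.Chars.rfindFrom]
  rw [if_neg (by omega : ¬ (6143 : Int) < 0), if_neg (by omega : ¬ (0 : Int) < 0)]
  by_cases hn : (cs.length : Int) < 6143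
  · rw [if_pos hn, if_neg (by omega : ¬ (cs.length : Int) < 0)]
    simp only [Int.toNat_zero, List.drop_zero, Int.toNat_natCast]
    exact hres cs.length (le_refl _) (by omega) (fun i hP _ => pv_match_le cs i hP)
  · rw [if_neg hn, if_neg (by omega : ¬ (6143 : Int) < 0)]
    simp only [Int.toNat_zero, List.drop_zero]
    rw [show ((6143 : Int)).toNat = 6143 from rfl]
    exact hres 6143 (by omega) (le_refl _) (fun i _ h43 => h43)

-- s.find(delimiter, 6140) is the first delimiter position at or past 6140
lemma pv_hi_spec (cs : List Char) :
    PySem.Chars.findFrom cs pvDelim 6140 none =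
      match ((pvOccs cs).filter (fun i => decide (6140 ≤ i))).head? with
      | none => -1
      | some j => (j : Int) := by
  have hshape : (pvOccs cs).filter (fun i => decide (6140 ≤ i))
      = (List.range cs.length).filter (fun i => decide (6140 ≤ i) && decide (pvDelim <+: cs.drop i)) := by
    rw [pvOccs, List.filter_filter]
  by_cases hn : cs.length < 6140
  · have h1 : PySem.Chars.findFrom cs pvDelim 6140 none = -1 := by
      simp only [PySem.Chars.findFrom]
      rw [if_neg (by omega : ¬ (6140 : Int) < 0)]
      rw [if_pos (by exact_mod_cast hn)]
    have h2 : (pvOccs cs).filter (fun i => decide (6140 ≤ i)) = [] := by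
      rw [hshape]
      exact pv_filter_nil _ _ _ (fun i hsi hin => by omega)
    rw [h1, h2]; rfl
  · have hn' : (6140 : Nat) ≤ cs.length := by omega
    by_cases hf : PySem.Chars.findFrom cs pvDelim 6140 none = -1
    · have hf' : PySem.Chars.findFrom cs pvDelim ((6140 : Nat) : Int) none = -1 := hf
      have hno : ¬ pvDelim <:+: cs.drop 6140 :=
        (PySem.Chars.findFrom_natCast_eq_neg_one_iff cs pvDelim 6140 hn').mp hf'
      have h2 : (pvOccs cs).filter (fun i => decide (6140 ≤ i)) = [] := by
        rw [hshape]
        apply pv_filter_nil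
        intro i hsi _
        rw [decide_eq_false_iff_not]
        intro hpre
        exact hno (pv_prefix_drop_infix cs 6140 i hsi hpre)
      rw [hf, h2]; rfl
    · have hf' : PySem.Chars.findFrom cs pvDelim ((6140 : Nat) : Int) none ≠ -1 := hf
      obtain ⟨hge, hpre, hmin⟩ := PySem.Chars.findFrom_natCast_spec cs pvDelim 6140 hn' hf'
      set j := PySem.Chars.findFrom cs pvDelim ((6140 : Nat) : Int) none with hjdef
      have hlen : j.toNat + 4 ≤ cs.length := pv_match_le cs j.toNat hpre
      have h2 : (pvOccs cs).filter (fun i => decide (6140 ≤ i))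
          = j.toNat :: (List.range cs.length).filter (fun i => decide (j.toNat + 1 ≤ i) && decide (pvDelim <+: cs.drop i)) := by
        rw [hshape]
        exact pv_filter_cons _ cs.length 6140 j.toNat (by omega) (by omega) (by simp [hpre])
          (fun i hsi hij => by
            rw [decide_eq_false_iff_not]
            exact hmin i hsi hij)
      rw [h2]
      show j = ((j.toNat : Nat) : Int)
      omega
  -- the A-side fold rewritten onto the list of end positions

lemma pv_foldA_ends (cs : List Char) (hchars : ∀ c ∈ cs, pvDomChar c = true) :
    ((List.range cs.length).foldl (pvStepA cs) (0, none, 0)).2.2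
      = (((pvOccs cs).map (· + 4)).foldl pvMinStep none).getD 0 := by
  have h1 : (List.range cs.length).foldl (pvStepA cs) (0, none, 0)
      = ((List.range cs.length).filter
          (fun (i : Nat) => decide (PySem.List.slice cs (some (i : Int)) (some ((i : Int) + 4)) = pvDelim))).foldl
          (pvGA cs) (0, none, 0) :=
    pv_foldl_filter (fun (i : Nat) => PySem.List.slice cs (some (i : Int)) (some ((i : Int) + 4)) = pvDelim)
      (pvGA cs) (List.range cs.length) (0, none, 0)
  have h2 : ((List.range cs.length).filter
        (fun (i : Nat) => decide (PySem.List.slice cs (some (i : Int)) (some ((i : Int) + 4)) = pvDelim)))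
      = pvOccs cs :=
    List.filter_congr (fun i _ => decide_eq_decide.mpr (pv_slice_eq_iff cs i))
  have h3 : (pvOccs cs).foldl (pvGA cs) (0, none, 0)
      = (pvOccs cs).foldl (fun st i => pvStepK st (i + 4)) (0, none, 0) := by
    apply PySem.List.foldl_congr_mem
    intro st i hi
    have hpre : pvDelim <+: cs.drop i := by
      have := (List.mem_filter.mp hi).2
      exact of_decide_eq_true this
    have hle : i + 4 ≤ cs.length := pv_match_le cs i hpre
    have hcast : ((i : Int) + 4) = ((i + 4 : Nat) : Int) := by push_cast; ring
    have hbytes : pvBytes (PySem.List.slice cs none (some ((i : Int) + 4))) = ((i + 4 : Nat) : Int) := by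
      rw [hcast, PySem.List.slice_to_natCast]
      rw [pv_bytes_len _ (fun c hc => hchars c (List.mem_of_mem_take hc))]
      rw [List.length_take]
      congr 1
      omega
    simp only [pvGA, pvStepK, hbytes]
  have h4 : (pvOccs cs).foldl (fun st i => pvStepK st (i + 4)) (0, none, 0)
      = ((pvOccs cs).map (· + 4)).foldl pvStepK (0, none, 0) :=
    List.foldl_map.symm
  rw [h1, h2, h3, h4, pv_argmin]

lemma pv_main (url_comments : List String) (hdom : Dom_format_gpt_request url_comments) :
    format_gpt_request url_comments = format_gpt_request_alt url_comments := by
  simp only [format_gpt_request, format_gpt_request_alt]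
  set cs := (PySem.Str.join " %% " url_comments).toList with hcs
  have hchars : ∀ c ∈ cs, pvDomChar c = true := by
    rw [hcs, PySem.Str.toList_join]
    apply pv_join_chars
    · intro c hc
      fin_cases hc <;> rfl
    · intro p hp c hc
      rcases List.mem_map.mp hp with ⟨s, hs, rfl⟩
      have := List.all_eq_true.mp hdom s hs
      exact List.all_eq_true.mp this c hc
  rw [pv_foldA_ends cs hchars, pv_lo_spec cs, pv_hi_spec cs]
  have hpair : ((pvOccs cs).map (· + 4)).Pairwise (· < ·) :=
    (List.pairwise_lt_range.filter _).map _ (by intro a b hab; omega)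
  rw [pv_bracket_spec _ hpair]
  unfold pvBracket
  have hElt : ((pvOccs cs).map (· + 4)).filter (fun e => decide (e < 6144))
      = ((pvOccs cs).filter (fun i => decide (i + 4 ≤ 6143))).map (· + 4) := by
    rw [List.filter_map]
    congr 1
    apply List.filter_congr
    intro i _
    simp only [Function.comp_apply]
    exact decide_eq_decide.mpr (by omega)
  have hEge : ((pvOccs cs).map (· + 4)).filter (fun e => decide (6144 ≤ e))
      = ((pvOccs cs).filter (fun i => decide (6140 ≤ i))).map (· + 4) := by
    rw [List.filter_map]
    congr 1
    apply List.filter_congr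
    intro i _
    simp only [Function.comp_apply]
    exact decide_eq_decide.mpr (by omega)
  rw [hElt, hEge, List.getLast?_map, List.head?_map]
  rcases hA : ((pvOccs cs).filter (fun i => decide (i + 4 ≤ 6143))).getLast? with _ | ia <;>
    rcases hB : ((pvOccs cs).filter (fun i => decide (6140 ≤ i))).head? with _ | jb
  · rfl
  · simp only [Option.map_none, Option.map_some]
    rw [if_pos trivial, if_neg (by omega : ¬ ((jb : Nat) : Int) = -1)]
    congr 2
    all_goals push_cast; ring
  · simp only [Option.map_none, Option.map_some]
    rw [if_neg (by omega : ¬ ((ia : Nat) : Int) = -1), if_pos trivial]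
    congr 2
    all_goals push_cast; ring
  · simp only [Option.map_none, Option.map_some]
    rw [if_neg (by omega : ¬ ((ia : Nat) : Int) = -1), if_neg (by omega : ¬ ((jb : Nat) : Int) = -1)]
    have hcond : ((6144 : Int) - ((ia + 4 : Nat) : Int) ≤ ((jb + 4 : Nat) : Int) - 6144)
        ↔ ((6144 : Int) - ((ia : Int) + 4) ≤ ((jb : Int) + 4) - 6144) := by
      push_cast
      constructor <;> intro h <;> omega
    by_cases hc : (6144 : Int) - ((ia + 4 : Nat) : Int) ≤ ((jb + 4 : Nat) : Int) - 6144
    · rw [if_pos hc, if_pos (hcond.mp hc)]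
      congr 2
      all_goals push_cast; ring
    · rw [if_neg hc, if_neg (fun h => hc (hcond.mpr h))]
      congr 2
      all_goals push_cast; ring

-- ===== VERDICT =====
theorem format_gpt_request_spec : Claim_equal_format_gpt_request := by
  intro url_comments hdom
  exact pv_main url_comments hdom
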